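-- pv_equiv track=rewrite | github.com/parth1609/DSA | Dsa_questions/You_and_your_books.py | max_Books
-- ===== SOURCE A (Python) =====
-- def max_Books(n, k, arr):
--     ans = 0
--     kurr = 0
--     for i in range(n):
--         if arr[i] <= k:
--             kurr += arr[i]
--         # when the consecutive satisfy int is end
--         else:
--             kurr = 0
--         ans = max(ans,kurr)
--     return ans
-- ===== SOURCE B (Python) =====
-- def max_Books(n, k, arr):
--     # Segment arr[:n] into maximal runs of elements <= k, then take the best
--     # prefix sum over all runs (floored at 0).
--     window = arr[:max(n, 0)]
--     runs = []
--     cur = []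
--     for x in window:
--         if x <= k:
--             cur.append(x)
--         elif cur:
--             runs.append(cur)
--             cur = []
--     if cur:
--         runs.append(cur)
--     best = 0
--     for run in runs:
--         s = 0
--         for x in run:
--             s += x
--             if s > best:
--                 best = s
--     return best
-- ===== Notes on version B (the rewrite author's own statement) =====
-- stated objective: alternative
-- what changed: Replaces the single index loop threading a running accumulator with a two-phase decomposition: first split arr[:n] into maximal runs of elements <= k, then take the maximum prefix sum over each run, floored at 0.
import Mathlib
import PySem

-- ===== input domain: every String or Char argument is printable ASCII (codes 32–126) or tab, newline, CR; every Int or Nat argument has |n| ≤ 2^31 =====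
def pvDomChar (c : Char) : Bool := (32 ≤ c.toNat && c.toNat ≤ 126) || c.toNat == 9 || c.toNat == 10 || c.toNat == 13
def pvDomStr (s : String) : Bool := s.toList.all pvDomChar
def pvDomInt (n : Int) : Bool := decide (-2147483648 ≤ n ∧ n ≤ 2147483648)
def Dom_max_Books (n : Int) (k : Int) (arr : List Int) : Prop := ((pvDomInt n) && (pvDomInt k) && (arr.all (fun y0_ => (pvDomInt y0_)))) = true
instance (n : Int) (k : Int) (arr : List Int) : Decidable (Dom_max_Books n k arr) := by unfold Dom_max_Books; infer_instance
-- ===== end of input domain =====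

-- B restructures A's single accumulator loop as: segment arr[:n] into maximal runs of
-- elements <= k, then maximise prefix sums over the runs (objective: alternative).

-- ===== PORT A =====
-- pyGetD is exact here: Pre_ guarantees every index 0 ≤ i < n is in range.
def max_Books (n : Int) (k : Int) (arr : List Int) : Int :=
  ((PySem.List.pyRange 0 n 1).foldl
    (fun (st : Int × Int) i =>
      let ai := PySem.List.pyGetD arr i 0
      let kurr := if ai ≤ k then st.2 + ai else (0 : Int)
      (max st.1 kurr, kurr))
    ((0 : Int), (0 : Int))).1

-- ===== PORT B =====
-- the run-builder loop of Source B (cur/runs accumulators), recursion on the window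
def pvRuns (k : Int) : List Int → List Int → List (List Int)
  | [], cur => if cur.isEmpty then [] else [cur]
  | x :: t, cur =>
      if x ≤ k then pvRuns k t (cur ++ [x])
      else (if cur.isEmpty then [] else [cur]) ++ pvRuns k t []

-- the inner reduce loop of Source B: best over prefix sums of one run
def pvBestRun (run : List Int) (best : Int) : Int :=
  (run.foldl
    (fun (p : Int × Int) x =>
      let s := p.1 + x
      (s, if s > p.2 then s else p.2))
    ((0 : Int), best)).2

def max_Books_alt (n : Int) (k : Int) (arr : List Int) : Int :=
  let window := PySem.List.slice arr none (some (max n 0))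
  (pvRuns k window []).foldl (fun best run => pvBestRun run best) 0

-- ===== PRECONDITION & SPEC =====
-- A indexes arr[i] for every i in range(n); it raises IndexError iff n > len(arr).
def Pre_max_Books (n : Int) (k : Int) (arr : List Int) : Prop := n ≤ (arr.length : Int)
instance (n : Int) (k : Int) (arr : List Int) : Decidable (Pre_max_Books n k arr) := by unfold Pre_max_Books; infer_instance
def pvWitness_max_Books : Int × Int × List Int := (2, 5, [1, 2])

def Spec_max_Books (n : Int) (k : Int) (arr : List Int) (out : Int) : Prop := out = max_Books_alt n k arr
instance (n : Int) (k : Int) (arr : List Int) (out : Int) : Decidable (Spec_max_Books n k arr out) := by unfold Spec_max_Books; infer_instance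

-- ===== CLAIM (what is proved, stated in full; the proofs are below) =====
def Claim_equal_max_Books : Prop := ∀ (n : Int) (k : Int) (arr : List Int), Dom_max_Books n k arr → Pre_max_Books n k arr → Spec_max_Books n k arr (max_Books n k arr)

-- ===== LEMMAS AND PROOFS =====

-- canonical recursion both ports are reduced to: A's loop written structurally
def pvGo (k : Int) : List Int → Int → Int → Int
  | [], ans, _ => ans
  | x :: t, ans, kurr =>
      let kurr' := if x ≤ k then kurr + x else 0
      pvGo k t (max ans kurr') kurr'

-- the body of pvBestRun's fold, named for the lemmas
def pvStep : Int × Int → Int → Int × Int :=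
  fun p x => let s := p.1 + x; (s, if s > p.2 then s else p.2)

theorem pvBestRun_eq (r : List Int) (b : Int) :
    pvBestRun r b = (r.foldl pvStep (0, b)).2 := rfl

theorem pvStep_fst (l : List Int) (s b : Int) :
    (l.foldl pvStep (s, b)).1 = s + l.sum := by
  induction l generalizing s b with
  | nil => simp
  | cons x t ih => simp [pvStep, ih]; ring

theorem pvStep_snd_le (l : List Int) (s b : Int) :
    b ≤ (l.foldl pvStep (s, b)).2 := by
  induction l generalizing s b with
  | nil => simp
  | cons x t ih =>
      simp only [List.foldl_cons, pvStep]
      refine le_trans ?_ (ih (s + x) _)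
      split <;> omega

theorem pvStep_snd_append (l : List Int) (x s b : Int) :
    ((l ++ [x]).foldl pvStep (s, b)).2
      = max ((l.foldl pvStep (s, b)).2) (s + l.sum + x) := by
  rw [List.foldl_append]
  have h1 := pvStep_fst l s b
  rcases hp : l.foldl pvStep (s, b) with ⟨p1, p2⟩
  rw [hp] at h1
  simp only [List.foldl_cons, List.foldl_nil, pvStep]
  simp at h1; subst h1
  by_cases h : s + l.sum + x ≤ p2
  · simp [not_lt.mpr h, max_eq_left h]
  · have h' : p2 < s + l.sum + x := by omega
    simp [h', max_eq_right (le_of_lt h')]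

-- fold over runs with an initial best
def pvF (rs : List (List Int)) (b : Int) : Int :=
  rs.foldl (fun best run => pvBestRun run best) b

theorem pvF_append (r1 r2 : List (List Int)) (b : Int) :
    pvF (r1 ++ r2) b = pvF r2 (pvF r1 b) := by
  simp [pvF, List.foldl_append]

-- the main invariant: pvGo over the rest of the window, with the running best and the
-- current run's sum, equals B's reduce over the runs still to be built
theorem pvKey (k : Int) (xs : List Int) :
    ∀ (cur : List Int) (b : Int), 0 ≤ b →
      pvGo k xs ((cur.foldl pvStep (0, b)).2) cur.sum
        = pvF (pvRuns k xs cur) b := by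
  induction xs with
  | nil =>
      intro cur b _
      by_cases hc : cur.isEmpty
      · simp at hc; subst hc; simp [pvGo, pvRuns, pvF]
      · simp [pvGo, pvRuns, hc, pvF, pvBestRun_eq]
  | cons x t ih =>
      intro cur b hb
      by_cases hx : x ≤ k
      · rw [show pvRuns k (x :: t) cur = pvRuns k t (cur ++ [x]) from by
          simp [pvRuns, hx]]
        rw [← ih (cur ++ [x]) b hb, pvStep_snd_append]
        simp only [pvGo, if_pos hx, List.sum_append, List.sum_cons, List.sum_nil]
        ring_nf
      · have hans : 0 ≤ (cur.foldl pvStep (0, b)).2 :=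
          le_trans hb (pvStep_snd_le cur 0 b)
        have htail := ih [] ((cur.foldl pvStep (0, b)).2) hans
        simp only [List.foldl_nil, List.sum_nil] at htail
        rw [show pvRuns k (x :: t) cur
            = (if cur.isEmpty then [] else [cur]) ++ pvRuns k t [] from by
          simp [pvRuns, hx]]
        rw [pvF_append]
        have hstep : pvGo k (x :: t) ((cur.foldl pvStep (0, b)).2) cur.sum
            = pvGo k t ((cur.foldl pvStep (0, b)).2) 0 := by
          simp [pvGo, hx, max_eq_left hans]
        rw [hstep, htail]
        by_cases hc : cur.isEmpty
        · simp at hc; subst hc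
          simp only [List.isEmpty_nil, if_pos, List.foldl_nil]
          rfl
        · simp only [hc, Bool.false_eq_true, not_false_iff, if_neg]
          have : pvF [cur] b = (cur.foldl pvStep (0, b)).2 := by
            simp [pvF, pvBestRun_eq]
          rw [this]

-- A's pair fold equals pvGo
theorem pvA_fold (k : Int) (xs : List Int) :
    ∀ (ans kurr : Int),
      (xs.foldl
        (fun (st : Int × Int) x =>
          let kurr := if x ≤ k then st.2 + x else (0 : Int)
          (max st.1 kurr, kurr)) (ans, kurr)).1 = pvGo k xs ans kurr := by
  induction xs with
  | nil => intro ans kurr; simp [pvGo]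
  | cons x t ih => intro ans kurr; simp only [List.foldl_cons, pvGo]; exact ih _ _

theorem max_Books_eq_go (n : Int) (k : Int) (arr : List Int)
    (hn : 0 ≤ n) (hle : n ≤ (arr.length : Int)) :
    max_Books n k arr = pvGo k (arr.take n.toNat) 0 0 := by
  unfold max_Books
  have hlen : ((arr.take n.toNat).length : Int) = n := by
    simp [List.length_take]; omega
  have hcongr :
      (PySem.List.pyRange 0 n 1).foldl
        (fun (st : Int × Int) i =>
          let ai := PySem.List.pyGetD arr i 0
          let kurr := if ai ≤ k then st.2 + ai else (0 : Int)
          (max st.1 kurr, kurr)) ((0 : Int), (0 : Int))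
      = (PySem.List.pyRange 0 (((arr.take n.toNat).length : Int)) 1).foldl
        (fun (st : Int × Int) i =>
          let ai := PySem.List.pyGetD (arr.take n.toNat) i 0
          let kurr := if ai ≤ k then st.2 + ai else (0 : Int)
          (max st.1 kurr, kurr)) ((0 : Int), (0 : Int)) := by
    rw [hlen]
    refine PySem.List.foldl_congr_mem _ _ _ _ ?_
    intro st i hi
    rw [PySem.List.mem_pyRange_one] at hi
    have hget : PySem.List.pyGetD arr i 0 = PySem.List.pyGetD (arr.take n.toNat) i 0 := by
      rw [PySem.List.pyGetD_eq_getElem arr 0 (by omega) (by omega),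
          PySem.List.pyGetD_eq_getElem (arr.take n.toNat) 0 (by omega) (by omega),
          List.getElem_take]
    rw [hget]
  rw [hcongr,
    PySem.List.foldl_pyRange_zero_pyGetD' (arr.take n.toNat) 0
      (fun (st : Int × Int) ai =>
        let kurr := if ai ≤ k then st.2 + ai else (0 : Int)
        (max st.1 kurr, kurr)) ((0 : Int), (0 : Int))]
  exact pvA_fold k (arr.take n.toNat) 0 0

theorem max_Books_alt_eq (n : Int) (k : Int) (arr : List Int) (hn : 0 ≤ n) :
    max_Books_alt n k arr = pvF (pvRuns k (arr.take n.toNat) []) 0 := by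
  unfold max_Books_alt pvF
  rw [max_eq_left hn, PySem.List.slice_to arr hn]

-- ===== VERDICT (by name: the statement is the Claim_ definition above) =====
theorem max_Books_spec : Claim_equal_max_Books := by
  intro n k arr _ hpre
  unfold Spec_max_Books
  by_cases hn : 0 ≤ n
  · rw [max_Books_eq_go n k arr hn hpre, max_Books_alt_eq n k arr hn]
    have := pvKey k (arr.take n.toNat) [] 0 le_rfl
    simpa using this
  · have h1 : max_Books n k arr = 0 := by
      unfold max_Books
      rw [PySem.List.pyRange_one_eq_nil (by omega)]
      rfl
    have h2 : max_Books_alt n k arr = 0 := by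
      unfold max_Books_alt
      rw [max_eq_right (by omega), PySem.List.slice_to arr le_rfl]
      rfl
    rw [h1, h2]
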